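-- pv_equiv track=rewrite | github.com/vrdiy/8086_decoder | str_util.py | add_spacing
-- ===== SOURCE A (Python) =====
-- def add_spacing(str : str) -> str:
--     lines = str.splitlines()
--     prev_word = lines[0].split(' ')[0]
--     out = ''
--
--     # Flag for if a consecutive grouping is currently formed
--     is_consecutive_grouping = False
--
--     for i in range(0,len(lines)):
--         first_word = lines[i].split(' ')[0]
--
--         # If a new first word is encountered...
--         if first_word != prev_word:
--
--             # and there was already a consecutive grouping
--             if is_consecutive_grouping == True:
--
--                 # Break this grouping
--                 prev_word = first_word
--                 is_consecutive_grouping = False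
--                 out += '\n'
--
--             # and there wasn't already a consecutive grouping
--             # Check bounds before looking at next line
--             elif i < len(lines)-1:
--
--                 # If the next word is the same as this new word, make a new grouping
--                 if lines[i+1].split(' ')[0] == first_word:
--                     prev_word = first_word
--                     out += '\n'
--
--                 # This code path is taken by non-consecutive groups
--                 # Doing nothing here allows non-consecutive groups to form
--                 else:
--                     #out += ';----------\n'
--                     pass
--
--         # Else the lines are a consecutive group
--         else:
--             is_consecutive_grouping = True
--         out += lines[i] + '\n'
--
--     return out
-- ===== SOURCE B (Python) =====
-- def add_spacing(str : str) -> str: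
--     lines = str.splitlines()
--     runs = _runs(lines)
--     return _emit(runs, runs[0][0], False)
--
-- def _first_word(line):
--     return line.split(' ')[0]
--
-- def _runs(lines):
--     # compress lines into maximal runs of consecutive equal first words
--     if not lines:
--         return []
--     w = _first_word(lines[0])
--     k = 1
--     while k < len(lines) and _first_word(lines[k]) == w:
--         k += 1
--     return [(w, lines[:k])] + _runs(lines[k:])
--
-- def _emit(runs, prev, grouped):
--     if not runs:
--         return ''
--     (w, members) = runs[0]
--     if w == prev:
--         sep, prev2, grouped2 = '', prev, True
--     elif grouped:
--         sep, prev2, grouped2 = '\n', w, len(members) >= 2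
--     elif len(members) >= 2:
--         sep, prev2, grouped2 = '\n', w, True
--     else:
--         sep, prev2, grouped2 = '', prev, grouped
--     block = ''
--     for m in members:
--         block += m + '\n'
--     return sep + block + _emit(runs[1:], prev2, grouped2)
-- ===== Notes on version B (the rewrite author's own statement) =====
-- stated objective: simpler
-- what changed: B replaces A's per-line index loop with lookahead and a prev_word/is_consecutive_grouping flag machine by a two-stage decomposition: first compress the lines into maximal runs of consecutive equal first words (a recursive span), then emit run by run, deciding the single blank separator from the run's word, its length and the carried (prev, grouped) state.
import Mathlib
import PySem

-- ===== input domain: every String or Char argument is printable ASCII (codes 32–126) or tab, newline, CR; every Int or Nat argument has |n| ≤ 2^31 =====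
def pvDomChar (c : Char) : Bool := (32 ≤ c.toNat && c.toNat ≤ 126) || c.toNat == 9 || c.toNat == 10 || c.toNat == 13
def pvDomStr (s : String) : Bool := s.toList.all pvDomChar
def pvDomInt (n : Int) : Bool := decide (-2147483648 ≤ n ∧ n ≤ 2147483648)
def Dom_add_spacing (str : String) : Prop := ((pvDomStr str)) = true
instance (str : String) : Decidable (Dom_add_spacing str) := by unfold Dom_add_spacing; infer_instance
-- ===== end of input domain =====

-- B replaces A's per-line lookahead/flag machine by runs-of-equal-first-words + per-run emission (simpler decomposition, same return value on every non-empty input; both raise IndexError on "").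

-- ===== PORT A =====
-- A-side helper: line.split(' ')[0]
def firstWordA (l : String) : String := ((PySem.Str.split? l " ").getD []).headD ""

-- the body of A's for-loop over i in range(0, len(lines)); state = (prev_word, out, is_consecutive_grouping)
def stepA (lines : List String) (st : String × String × Bool) (i : Int) : String × String × Bool :=
  let line := (PySem.List.pyGet? lines i).getD ""
  let first_word := firstWordA line
  let st' :=
    if first_word ≠ st.1 then
      if st.2.2 = true then (first_word, st.2.1 ++ "\n", false)
      else if i < (lines.length : Int) - 1 then
        if firstWordA ((PySem.List.pyGet? lines (i + 1)).getD "") = first_word then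
          (first_word, st.2.1 ++ "\n", st.2.2)
        else st
      else st
    else (st.1, st.2.1, true)
  (st'.1, st'.2.1 ++ (line ++ "\n"), st'.2.2)

def add_spacing (str : String) : String :=
  let lines := PySem.Str.splitlines str
  match lines with
  | [] => ""  -- Python raises IndexError on lines[0] here; excluded by Pre_add_spacing
  | l0 :: _ =>
    ((PySem.List.pyRange 0 (lines.length : Int) 1).foldl (stepA lines)
      (firstWordA l0, "", false)).2.1

-- ===== PORT B =====
-- B-side helper _first_word
def firstWordB (line : String) : String := ((PySem.Str.split? line " ").getD []).headD ""

-- _runs: compress into maximal runs of consecutive equal first words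
def runsB : List String → List (String × List String)
  | [] => []
  | l :: rest =>
    let w := firstWordB l
    (w, l :: rest.takeWhile (fun x => firstWordB x == w)) ::
      runsB (rest.dropWhile (fun x => firstWordB x == w))
termination_by l => l.length
decreasing_by exact Nat.lt_succ_of_le (List.length_dropWhile_le _ _)

-- _emit: one run at a time, carrying (prev, grouped)
def emitB : List (String × List String) → String → Bool → String
  | [], _, _ => ""
  | (w, members) :: rest, prev, grouped =>
    let t : String × String × Bool :=
      if w = prev then ("", prev, true)
      else if grouped = true then ("\n", w, decide (2 ≤ members.length))
      else if 2 ≤ members.length then ("\n", w, true)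
      else ("", prev, grouped)
    t.1 ++ members.foldl (fun block m => block ++ (m ++ "\n")) "" ++ emitB rest t.2.1 t.2.2

def add_spacing_alt (str : String) : String :=
  let lines := PySem.Str.splitlines str
  let runs := runsB lines
  match runs with
  | [] => ""  -- Python raises IndexError on runs[0] here; excluded by Pre_add_spacing
  | (w, ms) :: rs => emitB ((w, ms) :: rs) w false

-- ===== PRECONDITION & SPEC =====
-- A raises IndexError (lines[0]) exactly when the input has no lines, i.e. str = "": Pre_ excludes only the empty string.
def Pre_add_spacing (str : String) : Prop := PySem.Str.splitlines str ≠ []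
instance (str : String) : Decidable (Pre_add_spacing str) := by unfold Pre_add_spacing; infer_instance

def pvWitness_add_spacing : String := "mov ax\nmov bx\npop cx"

def Spec_add_spacing (str : String) (out : String) : Prop := out = add_spacing_alt str
instance (str : String) (out : String) : Decidable (Spec_add_spacing str out) := by unfold Spec_add_spacing; infer_instance

-- ===== CLAIM (what is proved, stated in full; the proofs are below) =====
def Claim_equal_add_spacing : Prop := ∀ (str : String), Dom_add_spacing str → Pre_add_spacing str → Spec_add_spacing str (add_spacing str)

-- ===== LEMMAS AND PROOFS =====

-- A's loop, rephrased as structural recursion on the remaining lines (with one-line lookahead)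
def goA : List String → String → Bool → String
  | [], _, _ => ""
  | l :: rest, prev, flag =>
    if firstWordA l ≠ prev then
      if flag = true then ("\n" ++ (l ++ "\n")) ++ goA rest (firstWordA l) false
      else
        if rest = [] then (l ++ "\n") ++ goA rest prev flag
        else if firstWordA (rest.headD "") = firstWordA l then
          ("\n" ++ (l ++ "\n")) ++ goA rest (firstWordA l) flag
        else (l ++ "\n") ++ goA rest prev flag
    else (l ++ "\n") ++ goA rest prev true

lemma fwBA : ∀ l, firstWordB l = firstWordA l := fun _ => rfl

lemma pyRange_one_self (a : Int) : PySem.List.pyRange a a 1 = [] := by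
  refine List.eq_nil_iff_forall_not_mem.mpr (fun i hi => ?_)
  have := (PySem.List.mem_pyRange_one).1 hi
  omega

def blockOf (ms : List String) : String :=
  ms.foldl (fun block m => block ++ (m ++ "\n")) ""

lemma blockOf_eq (ms : List String) :
    ms.foldl (fun block m => block ++ (m ++ "\n")) "" = blockOf ms := rfl

lemma blockOf_nil : blockOf [] = "" := rfl

lemma foldl_block_acc : ∀ (ms : List String) (b : String),
    ms.foldl (fun block m => block ++ (m ++ "\n")) b = b ++ blockOf ms := by
  intro ms
  induction ms with
  | nil => intro b; simp [blockOf]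
  | cons m ms ih =>
    intro b
    simp only [blockOf, List.foldl_cons]
    rw [ih (b ++ (m ++ "\n")), ih ("" ++ (m ++ "\n"))]
    simp [blockOf, String.append_assoc]

lemma blockOf_cons (l : String) (ms : List String) :
    blockOf (l :: ms) = (l ++ "\n") ++ blockOf ms := by
  simp only [blockOf, List.foldl_cons]
  rw [foldl_block_acc]
  simp [blockOf]

lemma goA_run : ∀ (run rest : List String) (prev : String) (flag : Bool),
    (∀ x ∈ run, firstWordA x = prev) →
    goA (run ++ rest) prev flag
      = blockOf run ++ goA rest prev (if run.isEmpty then flag else true) := by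
  intro run
  induction run with
  | nil => intro rest prev flag _; simp [blockOf_nil]
  | cons l run ih =>
    intro rest prev flag h
    have hl : firstWordA l = prev := h l (List.mem_cons_self ..)
    have hrec := ih rest prev true (fun x hx => h x (List.mem_cons_of_mem _ hx))
    rw [ite_self] at hrec
    have h1 : goA ((l :: run) ++ rest) prev flag = (l ++ "\n") ++ goA (run ++ rest) prev true := by
      rw [List.cons_append, goA, if_neg (by simp [hl])]
    rw [h1, hrec, blockOf_cons]
    simp [String.append_assoc]

lemma goA_eq_emitB : ∀ (n : Nat) (lines : List String), lines.length ≤ n → ∀ prev flag,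
    goA lines prev flag = emitB (runsB lines) prev flag := by
  intro n
  induction n with
  | zero =>
    intro lines h prev flag
    cases lines with
    | nil => simp [goA, runsB, emitB]
    | cons a b => exact absurd h (by simp)
  | succ n ih =>
    intro lines hlen prev flag
    cases lines with
    | nil => simp [goA, runsB, emitB]
    | cons l rest =>
      have hrest : rest.length ≤ n := by
        have := hlen; simp only [List.length_cons] at this; omega
      set p : String → Bool := fun x => firstWordB x == firstWordB l with hp
      have hsplit : rest.takeWhile p ++ rest.dropWhile p = rest := List.takeWhile_append_dropWhile
      have hlen' : (rest.dropWhile p).length ≤ n :=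
        le_trans (List.length_dropWhile_le _ _) hrest
      have hrunw : ∀ x ∈ rest.takeWhile p, firstWordA x = firstWordA l := by
        intro x hx
        have hpx := List.mem_takeWhile_imp hx
        simpa [hp, fwBA] using hpx
      have hrunsB : runsB (l :: rest)
          = (firstWordB l, l :: rest.takeWhile p) :: runsB (rest.dropWhile p) := by
        rw [runsB]
      by_cases hw : firstWordA l = prev
      · -- first word equals prev: grouping continues
        have h1 : goA (l :: rest) prev flag = (l ++ "\n") ++ goA rest prev true := by
          rw [goA, if_neg (by simp [hw])]
        rw [h1]
        conv_lhs => rw [← hsplit]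
        rw [goA_run _ _ _ _ (fun x hx => (hrunw x hx).trans hw), ite_self, ih _ hlen']
        rw [hrunsB]
        simp only [emitB, fwBA, hw, ite_true, blockOf_eq, blockOf_cons]
        simp [String.append_assoc]
      · by_cases hf : flag = true
        · -- new word while a grouping existed: break it with a blank line
          have h1 : goA (l :: rest) prev flag
              = ("\n" ++ (l ++ "\n")) ++ goA rest (firstWordA l) false := by
            rw [goA, if_pos (by simp [hw]), if_pos hf]
          rw [h1]
          conv_lhs => rw [← hsplit]
          rw [goA_run _ _ _ _ hrunw, ih _ hlen']
          rw [hrunsB]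
          have hgd : (decide (2 ≤ (l :: rest.takeWhile p).length))
              = (if (rest.takeWhile p).isEmpty then false else true) := by
            cases rest.takeWhile p <;> simp
          simp only [emitB, fwBA, hw, ite_false, hf, ite_true, hgd, blockOf_eq, blockOf_cons]
          simp [String.append_assoc]
        · have hfF : flag = false := by revert hf; cases flag <;> simp
          subst hfF
          cases rest with
          | nil =>
            simp [goA, runsB, emitB, hw, fwBA]
          | cons l2 t =>
            by_cases h2 : firstWordA l2 = firstWordA l
            · have hpl2 : p l2 = true := by simp [hp, fwBA, h2]
              have hrun_cons : (l2 :: t).takeWhile p = l2 :: t.takeWhile p :=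
                List.takeWhile_cons_of_pos hpl2
              have hdrop : (l2 :: t).dropWhile p = t.dropWhile p :=
                List.dropWhile_cons_of_pos hpl2
              have h1 : goA (l :: l2 :: t) prev false
                  = ("\n" ++ (l ++ "\n")) ++ goA (l2 :: t) (firstWordA l) false := by
                rw [goA, if_pos (by simp [hw])]
                simp only [Bool.false_eq_true, if_false]
                rw [if_neg (by simp), List.headD_cons, if_pos h2]
              rw [h1]
              have hsplit2 : (l2 :: t) = (l2 :: t.takeWhile p) ++ t.dropWhile p := by
                rw [List.cons_append]
                congr 1
                exact (List.takeWhile_append_dropWhile).symm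
              conv_lhs => rw [hsplit2]
              have hmem : ∀ x ∈ l2 :: t.takeWhile p, firstWordA x = firstWordA l := by
                intro x hx
                rcases List.mem_cons.mp hx with h | h
                · subst h; exact h2
                · exact hrunw x (by rw [hrun_cons]; exact List.mem_cons_of_mem _ h)
              rw [goA_run _ _ _ _ hmem]
              have hlen2 : (t.dropWhile p).length ≤ n := by
                have h1 := List.length_dropWhile_le p t
                simp only [List.length_cons] at hrest
                omega
              rw [ih _ hlen2]
              rw [hrunsB, hrun_cons, hdrop]
              simp only [emitB, fwBA, hw, ite_false, Bool.false_eq_true, List.isEmpty_cons]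
              rw [if_pos (by simp : 2 ≤ (l :: l2 :: t.takeWhile p).length)]
              simp only [blockOf_eq, blockOf_cons]
              simp [String.append_assoc]
            · have hpl2 : ¬ p l2 = true := by simp [hp, fwBA, h2]
              have hrun_nil : (l2 :: t).takeWhile p = [] :=
                List.takeWhile_cons_of_neg hpl2
              have hdrop : (l2 :: t).dropWhile p = l2 :: t :=
                List.dropWhile_cons_of_neg hpl2
              have h1 : goA (l :: l2 :: t) prev false
                  = (l ++ "\n") ++ goA (l2 :: t) prev false := by
                rw [goA, if_pos (by simp [hw])]
                simp only [Bool.false_eq_true, if_false]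
                rw [if_neg (by simp), List.headD_cons, if_neg h2]
              rw [h1, ih _ hrest]
              rw [hrunsB, hrun_nil, hdrop]
              simp only [emitB, fwBA, hw, ite_false, Bool.false_eq_true]
              rw [if_neg (by simp : ¬ (2 ≤ ([l] : List String).length))]
              simp only [blockOf_eq, blockOf_cons, blockOf_nil]
              simp [String.append_assoc]

lemma loopA_eq : ∀ (suf pre : List String) (prev out : String) (flag : Bool),
    ((PySem.List.pyRange (pre.length : Int) (((pre ++ suf).length : Nat) : Int) 1).foldl
        (stepA (pre ++ suf)) (prev, out, flag)).2.1
      = out ++ goA suf prev flag := by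
  intro suf
  induction suf with
  | nil =>
    intro pre prev out flag
    rw [List.append_nil, pyRange_one_self]
    simp [goA]
  | cons l rest ih =>
    intro pre prev out flag
    have hltn : pre.length < (pre ++ l :: rest).length := by simp
    have hlt : ((pre.length : Nat) : Int) < (((pre ++ l :: rest).length : Nat) : Int) := by
      exact_mod_cast hltn
    rw [PySem.List.pyRange_one_cons hlt, List.foldl_cons]
    have hget : (PySem.List.pyGet? (pre ++ l :: rest) ((pre.length : Nat) : Int)).getD "" = l := by
      rw [PySem.List.pyGet?_natCast]; simp
    have hpre1 : ((pre.length : Nat) : Int) + 1 = (((pre ++ [l]).length : Nat) : Int) := by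
      simp
    have hlist : pre ++ l :: rest = (pre ++ [l]) ++ rest := by simp
    have hihgen : ∀ (prev' out' : String) (flag' : Bool),
        ((PySem.List.pyRange (((pre.length : Nat) : Int) + 1)
            (((pre ++ l :: rest).length : Nat) : Int) 1).foldl
          (stepA (pre ++ l :: rest)) (prev', out', flag')).2.1 = out' ++ goA rest prev' flag' := by
      intro prev' out' flag'
      rw [hpre1]
      conv_lhs => rw [hlist]
      exact ih (pre ++ [l]) prev' out' flag'
    by_cases hw : firstWordA l = prev
    · have hstep : stepA (pre ++ l :: rest) (prev, out, flag) ((pre.length : Nat) : Int)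
          = (prev, out ++ (l ++ "\n"), true) := by
        simp [stepA, hw]
      rw [hstep, hihgen, goA, if_neg (by simp [hw])]
      simp [String.append_assoc]
    · by_cases hf : flag = true
      · have hstep : stepA (pre ++ l :: rest) (prev, out, flag) ((pre.length : Nat) : Int)
            = (firstWordA l, (out ++ "\n") ++ (l ++ "\n"), false) := by
          simp [stepA, hw, hf]
        rw [hstep, hihgen, goA, if_pos (by simp [hw]), if_pos hf]
        simp [String.append_assoc]
      · have hfF : flag = false := by revert hf; cases flag <;> simp
        subst hfF
        cases rest with
        | nil =>
          have hc3 : ¬ (((pre.length : Nat) : Int) < (((pre ++ [l]).length : Nat) : Int) - 1) := by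
            simp only [List.length_append, List.length_cons, List.length_nil]
            push_cast
            omega
          have hstep : stepA (pre ++ [l]) (prev, out, false) ((pre.length : Nat) : Int)
              = (prev, out ++ (l ++ "\n"), false) := by
            simp only [stepA]
            rw [hget]
            rw [if_pos (by simp [hw] : firstWordA l ≠ prev)]
            simp only [Bool.false_eq_true, if_false]
            rw [if_neg hc3]
          rw [hstep, hihgen]
          simp [goA, hw]
        | cons l2 t =>
          have hc3 : ((pre.length : Nat) : Int) < (((pre ++ l :: l2 :: t).length : Nat) : Int) - 1 := by
            simp only [List.length_append, List.length_cons]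
            push_cast
            omega
          have hget2 : (PySem.List.pyGet? (pre ++ l :: l2 :: t) (((pre.length : Nat) : Int) + 1)).getD "" = l2 := by
            have hcst : ((pre.length : Nat) : Int) + 1 = (((pre.length + 1 : Nat)) : Int) := by push_cast; ring
            rw [hcst, PySem.List.pyGet?_natCast]
            rw [List.getElem?_append_right (by omega)]
            simp
          by_cases h2 : firstWordA l2 = firstWordA l
          · have hstep : stepA (pre ++ l :: l2 :: t) (prev, out, false) ((pre.length : Nat) : Int)
                = (firstWordA l, (out ++ "\n") ++ (l ++ "\n"), false) := by
              simp only [stepA]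
              rw [hget]
              rw [if_pos (by simp [hw] : firstWordA l ≠ prev)]
              simp only [Bool.false_eq_true, if_false]
              rw [if_pos hc3, hget2, if_pos h2]
            rw [hstep, hihgen]
            conv_rhs => rw [goA]
            rw [if_pos (by simp [hw] : firstWordA l ≠ prev)]
            simp only [Bool.false_eq_true, if_false]
            rw [if_neg (by simp : ¬ (l2 :: t) = []), List.headD_cons, if_pos h2]
            simp [String.append_assoc]
          · have hstep : stepA (pre ++ l :: l2 :: t) (prev, out, false) ((pre.length : Nat) : Int)
                = (prev, out ++ (l ++ "\n"), false) := by
              simp only [stepA]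
              rw [hget]
              rw [if_pos (by simp [hw] : firstWordA l ≠ prev)]
              simp only [Bool.false_eq_true, if_false]
              rw [if_pos hc3, hget2, if_neg h2]
            rw [hstep, hihgen]
            conv_rhs => rw [goA]
            rw [if_pos (by simp [hw] : firstWordA l ≠ prev)]
            simp only [Bool.false_eq_true, if_false]
            rw [if_neg (by simp : ¬ (l2 :: t) = []), List.headD_cons, if_neg h2]
            simp [String.append_assoc]

-- ===== VERDICT (by name: the statement is the Claim_ definition above) =====
theorem add_spacing_spec : Claim_equal_add_spacing := by
  intro str _ hpre
  obtain ⟨l0, rest, hl⟩ : ∃ l0 rest, PySem.Str.splitlines str = l0 :: rest := by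
    cases h : PySem.Str.splitlines str with
    | nil => exact absurd h hpre
    | cons a b => exact ⟨a, b, rfl⟩
  show add_spacing str = add_spacing_alt str
  have hrunsB : runsB (l0 :: rest)
      = (firstWordB l0, l0 :: rest.takeWhile (fun x => firstWordB x == firstWordB l0)) ::
          runsB (rest.dropWhile (fun x => firstWordB x == firstWordB l0)) := by
    rw [runsB]
  have e1 : add_spacing str
      = ((PySem.List.pyRange 0 (((l0 :: rest).length : Nat) : Int) 1).foldl
          (stepA (l0 :: rest)) (firstWordA l0, "", false)).2.1 := by
    unfold add_spacing
    simp only [hl]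
  have e2 : add_spacing_alt str
      = emitB ((firstWordB l0, l0 :: rest.takeWhile (fun x => firstWordB x == firstWordB l0)) ::
          runsB (rest.dropWhile (fun x => firstWordB x == firstWordB l0))) (firstWordB l0) false := by
    unfold add_spacing_alt
    simp only [hl, hrunsB]
  rw [e1, e2, ← hrunsB]
  have hA := loopA_eq (l0 :: rest) [] (firstWordA l0) "" false
  simp only [List.nil_append, List.length_nil, Nat.cast_zero] at hA
  rw [hA]
  have hB := goA_eq_emitB (l0 :: rest).length (l0 :: rest) (le_refl _) (firstWordA l0) false
  rw [fwBA]
  simpa using hB
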